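-- pv_equiv track=rewrite | github.com/chong-yao/competitive-programming | MCC2024/5 Exploding Arrow.py | find_minimum_x
-- ===== SOURCE A (Python) =====
-- def can_destroy_all_targets(n, m, k, a, x):
--     remaining_hp = a[:]  # Copy of the original HP values
--     arrows_used = 0
--
--     i = 0
--     while i < n:
--         if remaining_hp[i] > 0:
--             if arrows_used == k:
--                 return False  # No more arrows left
--             arrows_used += 1
--
--             # Apply damage from arrow shot at target i
--             for j in range(i, n):
--                 if remaining_hp[j] > 0:
--                     damage = max(0, m * x - (j - i) ** 2)
--                     if damage == 0:
--                         break  # No further damage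
--                     remaining_hp[j] -= damage
--
--         # Move to the next target with positive HP
--         while i < n and remaining_hp[i] <= 0:
--             i += 1
--
--     return True
--
-- def find_minimum_x(n, m, k, a):
--     low, high = 1, 999999999999999999999999999999999999999999999999999999999999
--     final = high
--
--     while high >= low:
--         mid = (high + low) // 2
--         if can_destroy_all_targets(n, m, k, a, mid):
--             final = mid
--             high = mid - 1  # Try to find a smaller x
--         else:
--             low = mid + 1  # Try to find a larger x
--
--     return final
-- ===== SOURCE B (Python) =====
-- def find_minimum_x(n, m, k, a):
--     def can(x):
--         # O(n) greedy feasibility check: sliding window of still-active arrows,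
--         # quadratic damage aggregated with (count, sum p, sum p^2).
--         mx = m * x
--         used = 0
--         q = []            # positions of arrows still contributing damage, ascending
--         h = 0             # index of first active arrow in q
--         cnt = s1 = s2 = 0
--         j = 0
--         while j < n:
--             while h < len(q) and (j - q[h]) * (j - q[h]) >= mx:
--                 p = q[h]
--                 cnt -= 1
--                 s1 -= p
--                 s2 -= p * p
--                 h += 1
--             # total damage at j = sum over active p of (mx - (j-p)^2)
--             need = a[j] - (cnt * (mx - j * j) + 2 * j * s1 - s2)
--             while need > 0:
--                 if used == k:
--                     return False
--                 used += 1
--                 if mx > 0: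
--                     q.append(j)
--                     cnt += 1
--                     s1 += j
--                     s2 += j * j
--                     need -= mx
--             j += 1
--         return True
--
--     low, high = 1, 999999999999999999999999999999999999999999999999999999999999
--     final = high
--     while high >= low:
--         mid = (low + high) // 2
--         if can(mid):
--             final = mid
--             high = mid - 1
--         else:
--             low = mid + 1
--     return final
-- ===== Notes on version B (the rewrite author's own statement) =====
-- stated objective: alternative
-- what changed: The per-arrow damage simulation on a mutable HP array (re-scanning up to sqrt(m*x) targets per arrow) is replaced by a one-pass sliding-window feasibility check that aggregates the quadratic arrow damage with three running sums (count, sum of positions, sum of squared positions); the binary search over x is kept; intended as asymptotically faster per probe, but a timing run measured only ~1.2x on its inputs, so no speed is claimed.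
import Mathlib
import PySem

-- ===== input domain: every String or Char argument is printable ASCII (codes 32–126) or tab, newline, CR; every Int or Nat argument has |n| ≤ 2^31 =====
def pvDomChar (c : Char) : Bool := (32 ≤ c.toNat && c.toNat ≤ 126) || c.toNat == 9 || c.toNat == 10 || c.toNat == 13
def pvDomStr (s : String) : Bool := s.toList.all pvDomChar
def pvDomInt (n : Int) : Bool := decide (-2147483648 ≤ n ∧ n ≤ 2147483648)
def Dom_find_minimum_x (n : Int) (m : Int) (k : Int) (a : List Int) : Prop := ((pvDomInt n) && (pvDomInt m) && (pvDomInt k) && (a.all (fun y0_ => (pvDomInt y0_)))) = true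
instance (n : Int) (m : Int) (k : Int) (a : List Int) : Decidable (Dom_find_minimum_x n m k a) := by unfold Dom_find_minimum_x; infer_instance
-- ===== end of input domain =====

-- B replaces A's per-arrow damage re-scan of the HP array by a one-pass sliding-window check that
-- aggregates the quadratic arrow damage with three running sums; objective: alternative algorithm
-- (a timing run did not confirm a speed-up on its inputs, so none is claimed).

-- shared index accessor: Python xs[i] (in-range under Pre_; pyGetD is the total form)
def pvGet (l : List Int) (i : Int) : Int := PySem.List.pyGetD l i 0
-- Python hp[j] = v for an in-range j (the only writes A performs)
def pvSet (l : List Int) (i v : Int) : List Int := l.set i.toNat v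

-- ===== PORT A =====
-- 'for j in range(i, n): … break …' of can_destroy_all_targets
def pvA_damage (mx n i : Int) (j : Int) (hp : List Int) : List Int :=
  if _h : j < n then
    if 0 < pvGet hp j then
      let damage := max 0 (mx - (j - i) ^ 2)
      if damage = 0 then hp
      else pvA_damage mx n i (j + 1) (pvSet hp j (pvGet hp j - damage))
    else pvA_damage mx n i (j + 1) hp
  else hp
termination_by (n - j).toNat
decreasing_by all_goals omega

-- 'while i < n and remaining_hp[i] <= 0: i += 1'
def pvA_advance (n : Int) (hp : List Int) (i : Int) : Int :=
  if _h : i < n ∧ pvGet hp i ≤ 0 then pvA_advance n hp (i + 1) else i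
termination_by (n - i).toNat
decreasing_by omega

-- outer 'while i < n' loop; the fuel is a totalisation guard only: it exceeds the number of
-- iterations on every input admitted by Pre_ (each iteration advances i, spends an arrow of
-- positive damage, or moves arrows_used up towards k)
def pvA_loop (n mx k : Int) : Nat → Int → Int → List Int → Bool
  | 0, _, _, _ => true
  | fuel + 1, i, used, hp =>
    if i < n then
      if 0 < pvGet hp i then
        if used = k then false
        else
          pvA_loop n mx k fuel (pvA_advance n (pvA_damage mx n i i hp) i) (used + 1)
            (pvA_damage mx n i i hp)
      else pvA_loop n mx k fuel (pvA_advance n hp i) used hp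
    else true

def pvA_fuel (n k : Int) (a : List Int) : Nat :=
  n.toNat + k.toNat + (a.map Int.toNat).sum + 2

def can_destroy_all_targets (n m k : Int) (a : List Int) (x : Int) : Bool :=
  pvA_loop n (m * x) k (pvA_fuel n k a) 0 0 a

def pvBig : Int := 999999999999999999999999999999999999999999999999999999999999

def pvA_search (n m k : Int) (a : List Int) (low high final : Int) : Int :=
  if _h : low ≤ high then
    if can_destroy_all_targets n m k a (PySem.Int.floordiv (high + low) 2) then
      pvA_search n m k a low (PySem.Int.floordiv (high + low) 2 - 1)
        (PySem.Int.floordiv (high + low) 2)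
    else pvA_search n m k a (PySem.Int.floordiv (high + low) 2 + 1) high final
  else final
termination_by (high - low + 1).toNat
decreasing_by
  all_goals
    have hb := PySem.Int.floordiv_two_mid_bounds _h
    rw [Int.add_comm low high] at hb
    omega

def find_minimum_x (n : Int) (m : Int) (k : Int) (a : List Int) : Int :=
  pvA_search n m k a 1 pvBig pvBig

-- ===== PORT B =====
-- 'while h < len(q) and (j - q[h])*(j - q[h]) >= mx: …' — drop expired arrows from the window
def pvB_pop (mx j : Int) (q : List Int) (h cnt s1 s2 : Int) : Int × Int × Int × Int :=
  if _hh : h < (q.length : Int) ∧ mx ≤ (j - pvGet q h) * (j - pvGet q h) then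
    pvB_pop mx j q (h + 1) (cnt - 1) (s1 - pvGet q h) (s2 - pvGet q h * pvGet q h)
  else (h, cnt, s1, s2)
termination_by ((q.length : Int) - h).toNat
decreasing_by omega

-- 'while need > 0: …' — fire arrows at j; the fuel is a totalisation guard only (it exceeds the
-- iteration count on every input admitted by Pre_); none = 'return False'
def pvB_shoot (mx k j : Int) : Nat → Int → List Int → Int → Int → Int → Int →
    Option (Int × List Int × Int × Int × Int)
  | 0, _, _, _, _, _, _ => none
  | fuel + 1, used, q, cnt, s1, s2, need =>
    if 0 < need then
      if used = k then none
      else if 0 < mx then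
        pvB_shoot mx k j fuel (used + 1) (q ++ [j]) (cnt + 1) (s1 + j) (s2 + j * j) (need - mx)
      else pvB_shoot mx k j fuel (used + 1) q cnt s1 s2 need
    else some (used, q, cnt, s1, s2)

-- 'while j < n' scan of can(x)
def pvB_main (mx k n : Int) (a : List Int) (j used : Int) (q : List Int)
    (h cnt s1 s2 : Int) : Bool :=
  if _hj : j < n then
    match pvB_pop mx j q h cnt s1 s2 with
    | (h', cnt', s1', s2') =>
      match pvB_shoot mx k j (k.toNat + (pvGet a j).toNat + 2) used q cnt' s1' s2'
          (pvGet a j - (cnt' * (mx - j * j) + 2 * j * s1' - s2')) with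
      | none => false
      | some (u', q', c2, t1, t2) => pvB_main mx k n a (j + 1) u' q' h' c2 t1 t2
  else true
termination_by (n - j).toNat
decreasing_by omega

-- 'def can(x)' of B
def pvB_can (n m k : Int) (a : List Int) (x : Int) : Bool :=
  pvB_main (m * x) k n a 0 0 [] 0 0 0 0

def pvB_search (n m k : Int) (a : List Int) (low high final : Int) : Int :=
  if _h : low ≤ high then
    if pvB_can n m k a (PySem.Int.floordiv (low + high) 2) then
      pvB_search n m k a low (PySem.Int.floordiv (low + high) 2 - 1)
        (PySem.Int.floordiv (low + high) 2)
    else pvB_search n m k a (PySem.Int.floordiv (low + high) 2 + 1) high final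
  else final
termination_by (high - low + 1).toNat
decreasing_by
  all_goals
    have hb := PySem.Int.floordiv_two_mid_bounds _h
    omega

def find_minimum_x_alt (n : Int) (m : Int) (k : Int) (a : List Int) : Int :=
  pvB_search n m k a 1 pvBig pvBig

-- ===== PRECONDITION & SPEC =====
-- Pre_ restricts to the natural domain n ≤ len(a): outside it A's scan raises IndexError unless
-- it runs out of arrows first (then both programs return the same value, e.g. (5,1,0,[1])); it
-- also excludes (m ≤ 0 and k < 0 with a positive HP among the first n targets), on which A's
-- outer loop never terminates (arrows deal no damage and arrows_used never equals k).
def Pre_find_minimum_x (n : Int) (m : Int) (k : Int) (a : List Int) : Prop :=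
  n ≤ (a.length : Int) ∧ (0 ≤ k ∨ 1 ≤ m ∨ ∀ v ∈ a.take n.toNat, v ≤ 0)
instance (n : Int) (m : Int) (k : Int) (a : List Int) : Decidable (Pre_find_minimum_x n m k a) := by
  unfold Pre_find_minimum_x; infer_instance

def pvWitness_find_minimum_x : Int × Int × Int × List Int := (2, 1, 2, [3, 5])

def Spec_find_minimum_x (n : Int) (m : Int) (k : Int) (a : List Int) (out : Int) : Prop :=
  out = find_minimum_x_alt n m k a
instance (n : Int) (m : Int) (k : Int) (a : List Int) (out : Int) :
    Decidable (Spec_find_minimum_x n m k a out) := by unfold Spec_find_minimum_x; infer_instance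

-- ===== CLAIM (what is proved, stated in full; the proofs are below) =====
def Claim_equal_find_minimum_x : Prop := ∀ (n : Int) (m : Int) (k : Int) (a : List Int),
  Dom_find_minimum_x n m k a → Pre_find_minimum_x n m k a →
  Spec_find_minimum_x n m k a (find_minimum_x n m k a)

-- ===== LEMMAS AND PROOFS =====

-- damage of one arrow shot at p, felt at distance d
def pvF (mx d : Int) : Int := max 0 (mx - d * d)
-- total damage felt at j from the arrows P (the mathematical meaning both checks compute)
def pvS (mx : Int) (P : List Int) (j : Int) : Int := (P.map (fun p => pvF mx (j - p))).sum

theorem pvF_nonneg (mx d : Int) : 0 ≤ pvF mx d := le_max_left _ _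

theorem pvS_nonneg (mx : Int) (P : List Int) (j : Int) : 0 ≤ pvS mx P j := by
  apply List.sum_nonneg
  intro v hv
  simp only [List.mem_map] at hv
  obtain ⟨p, _, rfl⟩ := hv
  exact pvF_nonneg _ _

theorem pvS_append (mx : Int) (P : List Int) (p0 j : Int) :
    pvS mx (P ++ [p0]) j = pvS mx P j + pvF mx (j - p0) := by
  simp [pvS]

theorem pvF_dead {mx p j j' : Int} (hpj : p ≤ j) (hjj : j ≤ j')
    (hd : mx ≤ (j - p) * (j - p)) : pvF mx (j' - p) = 0 := by
  have h1 : (j - p) * (j - p) ≤ (j' - p) * (j' - p) :=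
    mul_self_le_mul_self (by omega) (by omega)
  have : mx - (j' - p) * (j' - p) ≤ 0 := by omega
  simp [pvF]
  omega

theorem pvF_active {mx d : Int} (h : d * d < mx) : pvF mx d = mx - d * d := by
  simp [pvF]; omega

theorem pvF_nonpos {mx : Int} (h : mx ≤ 0) (d : Int) : pvF mx d = 0 := by
  have : 0 ≤ d * d := mul_self_nonneg d
  simp [pvF]; omega

-- closed form of the window sum B maintains
theorem pvQuadSum (mx j : Int) : ∀ l : List Int,
    (l.map (fun p => mx - (j - p) * (j - p))).sum
      = (l.length : Int) * (mx - j * j) + 2 * j * l.sum - (l.map (fun p => p * p)).sum := by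
  intro l
  induction l with
  | nil => simp
  | cons p l ih =>
    simp only [List.map_cons, List.sum_cons, List.length_cons, ih]
    push_cast
    ring

theorem pvActiveSum (mx j : Int) : ∀ l : List Int, (∀ p ∈ l, (j - p) * (j - p) < mx) →
    (l.map (fun p => pvF mx (j - p))).sum = (l.map (fun p => mx - (j - p) * (j - p))).sum := by
  intro l hl
  induction l with
  | nil => rfl
  | cons p l ih =>
    simp only [List.map_cons, List.sum_cons]
    rw [pvF_active (hl p (by simp)), ih (fun p' hp' => hl p' (by simp [hp']))]

-- list access / update bridges
theorem pvGet_eq_getElem {l : List Int} {i : Int} (h0 : 0 ≤ i) (hl : i < (l.length : Int)) :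
    pvGet l i = l[i.toNat]'(by omega) := by
  simpa [pvGet] using PySem.List.pyGetD_eq_getElem l 0 h0 hl

theorem pvGet_oob {l : List Int} {i : Int} (h : (l.length : Int) ≤ i) : pvGet l i = 0 := by
  unfold pvGet
  simp only [PySem.List.pyGetD, PySem.List.pyGet?, PySem.List.pyIdx?]
  rw [if_pos (by omega), if_neg (by omega)]
  rfl

theorem pvGet_pvSet {l : List Int} {jj v t : Int} (h0 : 0 ≤ jj) (hl : jj < (l.length : Int))
    (ht : 0 ≤ t) : pvGet (pvSet l jj v) t = if t = jj then v else pvGet l t := by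
  by_cases hlt : t < (l.length : Int)
  · have hlen2 : t < (((pvSet l jj v).length : Nat) : Int) := by simp [pvSet]; omega
    rw [pvGet_eq_getElem ht hlen2]
    simp only [pvSet]
    rw [List.getElem_set]
    by_cases he : t = jj
    · simp [he]
    · rw [if_neg (by omega), if_neg he]
      exact (pvGet_eq_getElem ht hlt).symm
  · have he : ¬ t = jj := by omega
    simp only [he, if_false]
    rw [pvGet_oob (by simp [pvSet]; omega), pvGet_oob (by omega)]

theorem pvSet_length (l : List Int) (i v : Int) : (pvSet l i v).length = l.length := by
  simp [pvSet]

-- ===== A-side characterisations =====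

-- the HP invariant: an alive target's HP is its initial HP minus the full damage of all
-- arrows shot so far; a dead target's full-damage value is nonpositive as well
def pvAInv (mx n : Int) (a hp P : List Int) (i : Int) : Prop :=
  hp.length = a.length ∧
  ∀ j : Int, i ≤ j → j < n →
    (0 < pvGet hp j → pvGet hp j = pvGet a j - pvS mx P j) ∧
    (pvGet hp j ≤ 0 → pvGet a j - pvS mx P j ≤ 0)

theorem pvA_damage_spec (mx n i : Int) (h0i : 0 ≤ i) :
    ∀ dN : Nat, ∀ (j : Int) (hp : List Int), (n - j).toNat = dN → i ≤ j →
      n ≤ (hp.length : Int) →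
      (pvA_damage mx n i j hp).length = hp.length ∧
      (∀ t : Int, 0 ≤ t → (t < j ∨ n ≤ t) → pvGet (pvA_damage mx n i j hp) t = pvGet hp t) ∧
      (∀ t : Int, j ≤ t → t < n →
        pvGet (pvA_damage mx n i j hp) t
          = if 0 < pvGet hp t then pvGet hp t - pvF mx (t - i) else pvGet hp t) := by
  intro dN
  induction dN with
  | zero =>
    intro j hp h1 h2 h3
    rw [pvA_damage, dif_neg (by omega)]
    exact ⟨rfl, fun t _ _ => rfl, fun t h4 h5 => by omega⟩
  | succ d ih =>
    intro j hp h1 h2 h3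
    have hjn : j < n := by omega
    rw [pvA_damage, dif_pos hjn]
    have hFeq : max 0 (mx - (j - i) ^ 2) = pvF mx (j - i) := by
      rw [pvF, pow_two]
    by_cases hal : 0 < pvGet hp j
    · rw [if_pos hal]
      by_cases hz : max 0 (mx - (j - i) ^ 2) = 0
      · rw [if_pos hz]
        refine ⟨rfl, fun t _ _ => rfl, fun t h4 h5 => ?_⟩
        have hdead : pvF mx (t - i) = 0 := by
          refine pvF_dead (p := i) (j := j) h2 h4 ?_
          have : mx - (j - i) ^ 2 ≤ 0 := by
            by_contra hc
            rw [max_eq_right (by omega)] at hz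
            omega
          rw [pow_two] at this
          omega
        rw [hdead]
        split_ifs <;> omega
      · rw [if_neg hz]
        have hdpos : 0 < max 0 (mx - (j - i) ^ 2) := by
          rcases (max_choice 0 (mx - (j - i) ^ 2)) with hc | hc <;> omega
        set dmg := max 0 (mx - (j - i) ^ 2) with hdmg
        set hp1 := pvSet hp j (pvGet hp j - dmg) with hhp1
        have hlen1 : hp1.length = hp.length := pvSet_length _ _ _
        obtain ⟨ihl, ihu, ihc⟩ := ih (j + 1) hp1 (by omega) (by omega) (by omega)
        have hget1 : ∀ t : Int, 0 ≤ t → pvGet hp1 t = if t = j then pvGet hp j - dmg else pvGet hp t :=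
          fun t htt => pvGet_pvSet (by omega) (by omega) htt
        refine ⟨by rw [ihl, hlen1], ?_, ?_⟩
        · intro t ht0 htr
          rw [ihu t ht0 (by omega), hget1 t ht0, if_neg (by omega)]
        · intro t h4 h5
          by_cases hteq : t = j
          · subst hteq
            rw [ihu t (by omega) (by omega), hget1 t (by omega), if_pos rfl, if_pos hal, hFeq]
          · rw [ihc t (by omega) h5, hget1 t (by omega), if_neg hteq]
    · rw [if_neg hal]
      obtain ⟨ihl, ihu, ihc⟩ := ih (j + 1) hp (by omega) (by omega) h3
      refine ⟨ihl, fun t ht0 htr => ihu t ht0 (by omega), ?_⟩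
      intro t h4 h5
      by_cases hteq : t = j
      · subst hteq
        rw [ihu t (by omega) (by omega), if_neg hal]
      · exact ihc t (by omega) h5

theorem pvA_advance_spec (n : Int) (hp : List Int) :
    ∀ dN : Nat, ∀ i : Int, (n - i).toNat = dN →
      i ≤ pvA_advance n hp i ∧ pvA_advance n hp i ≤ max i n ∧
      (∀ t : Int, i ≤ t → t < pvA_advance n hp i → pvGet hp t ≤ 0) ∧
      (pvA_advance n hp i < n → 0 < pvGet hp (pvA_advance n hp i)) := by
  intro dN
  induction dN with
  | zero =>
    intro i h1
    rw [pvA_advance, dif_neg (fun hc => by omega)]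
    exact ⟨le_refl _, le_max_left _ _, fun t h4 h5 => by omega, fun hc => by omega⟩
  | succ d ih =>
    intro i h1
    by_cases hg : i < n ∧ pvGet hp i ≤ 0
    · rw [pvA_advance, dif_pos hg]
      obtain ⟨ih1, ih2, ih3, ih4⟩ := ih (i + 1) (by omega)
      refine ⟨by omega, by omega, ?_, ih4⟩
      intro t h4 h5
      by_cases hti : t = i
      · subst hti; exact hg.2
      · exact ih3 t (by omega) h5
    · rw [pvA_advance, dif_neg hg]
      refine ⟨le_refl _, le_max_left _ _, fun t h4 h5 => by omega, fun hc => ?_⟩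
      rcases not_and_or.mp hg with hc' | hc'
      · omega
      · omega

theorem pvA_advance_alive {n i : Int} {hp : List Int} (h : 0 < pvGet hp i) :
    pvA_advance n hp i = i := by
  rw [pvA_advance]
  simp
  omega

theorem pvA_loop_stop (n mx k : Int) (f : Nat) (i used : Int) (hp : List Int) (h : n ≤ i) :
    pvA_loop n mx k f i used hp = true := by
  cases f with
  | zero => rfl
  | succ f => simp [pvA_loop]; omega

-- AInv is preserved by shooting one arrow at the (alive) position i
theorem pvAInv_mono {mx n : Int} {a hp P : List Int} {i i' : Int}
    (hinv : pvAInv mx n a hp P i) (h : i ≤ i') : pvAInv mx n a hp P i' :=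
  ⟨hinv.1, fun j hj1 hj2 => hinv.2 j (by omega) hj2⟩

theorem pvAInv_shoot {mx n : Int} {a hp P : List Int} {i : Int} (h0i : 0 ≤ i) (_hin : i < n)
    (hlen : n ≤ (a.length : Int)) (hinv : pvAInv mx n a hp P i) :
    pvAInv mx n a (pvA_damage mx n i i hp) (P ++ [i]) i := by
  obtain ⟨hl, hinv2⟩ := hinv
  obtain ⟨dl, _, dc⟩ := pvA_damage_spec mx n i h0i (n - i).toNat i hp rfl (le_refl i) (by omega)
  refine ⟨by rw [dl, hl], ?_⟩
  intro j h4 h5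
  have hchar := dc j h4 h5
  have hS := pvS_append mx P i j
  have hF := pvF_nonneg mx (j - i)
  have hSn := pvS_nonneg mx P j
  by_cases hal : 0 < pvGet hp j
  · rw [if_pos hal] at hchar
    have heq := (hinv2 j h4 h5).1 hal
    constructor
    · intro _; rw [hchar, hS, heq]; ring
    · intro hle; rw [hchar, heq] at hle; rw [hS]; omega
  · rw [if_neg hal] at hchar
    have hle := (hinv2 j h4 h5).2 (by omega)
    constructor
    · intro hpos; rw [hchar] at hpos; omega
    · intro _; rw [hS]; omega

-- ===== termination measure for A's outer loop =====

def pvSuf (n : Int) (hp : List Int) (i : Int) : Nat :=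
  if _h : i < n then (pvGet hp i).toNat + pvSuf n hp (i + 1) else 0
termination_by (n - i).toNat
decreasing_by omega

def pvMu (n mx k : Int) (i used : Int) (hp : List Int) : Nat :=
  (n - i).toNat + (if 1 ≤ mx then pvSuf n hp i else (k - used).toNat)

theorem pvSuf_cons {n i : Int} (hp : List Int) (h : i < n) :
    pvSuf n hp i = (pvGet hp i).toNat + pvSuf n hp (i + 1) := by
  rw [pvSuf]; simp [h]

theorem pvSuf_stop {n i : Int} (hp : List Int) (h : n ≤ i) : pvSuf n hp i = 0 := by
  rw [pvSuf]; simp; omega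

theorem pvSuf_mono_idx (n : Int) (hp : List Int) :
    ∀ dN : Nat, ∀ i i' : Int, (i' - i).toNat = dN → i ≤ i' →
      pvSuf n hp i' ≤ pvSuf n hp i := by
  intro dN
  induction dN with
  | zero =>
    intro i i' h1 h2
    have h3 : pvSuf n hp i' = pvSuf n hp i := by rw [(by omega : i = i')]
    omega
  | succ d ih =>
    intro i i' h1 h2
    by_cases hn : i < n
    · rw [pvSuf_cons hp hn]
      have := ih (i + 1) i' (by omega) (by omega)
      omega
    · have h0 : pvSuf n hp i = 0 := pvSuf_stop hp (by omega)
      have h0' : pvSuf n hp i' = 0 := pvSuf_stop hp (by omega)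
      omega

theorem pvSuf_le_pointwise (n : Int) (hp' hp : List Int) :
    ∀ dN : Nat, ∀ i : Int, (n - i).toNat = dN → 0 ≤ i →
      (∀ t : Int, i ≤ t → t < n → pvGet hp' t ≤ pvGet hp t) →
      pvSuf n hp' i ≤ pvSuf n hp i := by
  intro dN
  induction dN with
  | zero => intro i h1 h2 h3; rw [pvSuf_stop hp' (by omega), pvSuf_stop hp (by omega)]
  | succ d ih =>
    intro i h1 h2 h3
    rw [pvSuf_cons hp' (by omega), pvSuf_cons hp (by omega)]
    have ht := h3 i (le_refl i) (by omega)
    have := ih (i + 1) (by omega) (by omega) (fun t a b => h3 t (by omega) b)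
    omega

theorem pvSuf_le_total (n : Int) (a : List Int) :
    ∀ dN : Nat, ∀ i : Int, (n - i).toNat = dN → 0 ≤ i → n ≤ (a.length : Int) →
      pvSuf n a i ≤ (a.map Int.toNat).sum := by
  have key : ∀ dN : Nat, ∀ i : Int, (n - i).toNat = dN → 0 ≤ i → n ≤ (a.length : Int) →
      pvSuf n a i ≤ ((a.drop i.toNat).map Int.toNat).sum := by
    intro dN
    induction dN with
    | zero => intro i h1 h2 h3; rw [pvSuf_stop a (by omega)]; exact Nat.zero_le _
    | succ d ih =>
      intro i h1 h2 h3
      have hil : i.toNat < a.length := by omega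
      rw [pvSuf_cons a (by omega), List.drop_eq_getElem_cons hil, List.map_cons, List.sum_cons]
      have hg : pvGet a i = a[i.toNat] := pvGet_eq_getElem h2 (by omega)
      have := ih (i + 1) (by omega) (by omega) h3
      rw [(by omega : (i + 1).toNat = i.toNat + 1)] at this
      omega
  intro dN i h1 h2 h3
  calc pvSuf n a i ≤ ((a.drop i.toNat).map Int.toNat).sum := key dN i h1 h2 h3
    _ ≤ (a.map Int.toNat).sum := by
        conv_rhs => rw [← List.take_append_drop i.toNat a]
        rw [List.map_append, List.sum_append]
        exact Nat.le_add_left _ _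

-- ===== B-side characterisations =====

-- the window invariant of B's scan, entering position j: q holds the arrow positions that ever
-- entered the window, ascending and ≤ j; (cnt, s1, s2) aggregate the still-held suffix q.drop h;
-- and the total damage of ALL arrows P equals, at every j' ≥ j, the damage of that suffix alone
def pvBInv (mx : Int) (P q : List Int) (h cnt s1 s2 j : Int) : Prop :=
  0 ≤ h ∧ h ≤ (q.length : Int) ∧ q.Pairwise (· ≤ ·) ∧ (∀ p ∈ q, 0 ≤ p ∧ p ≤ j) ∧
  cnt = ((q.drop h.toNat).length : Int) ∧ s1 = (q.drop h.toNat).sum ∧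
  s2 = ((q.drop h.toNat).map (fun p => p * p)).sum ∧
  (∀ j' : Int, j ≤ j' →
    pvS mx P j' = ((q.drop h.toNat).map (fun p => pvF mx (j' - p))).sum)

theorem pvBInv_step {mx : Int} {P q : List Int} {h cnt s1 s2 j j' : Int}
    (hinv : pvBInv mx P q h cnt s1 s2 j) (hj : j ≤ j') : pvBInv mx P q h cnt s1 s2 j' := by
  obtain ⟨a1, a2, a3, a4, a5, a6, a7, a8⟩ := hinv
  exact ⟨a1, a2, a3, fun p hp => ⟨(a4 p hp).1, le_trans (a4 p hp).2 hj⟩, a5, a6, a7,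
    fun t ht => a8 t (le_trans hj ht)⟩

-- pvB_pop: pops exactly the expired head arrows; afterwards every held arrow is active at j,
-- and the aggregates/invariant still hold
theorem pvB_pop_spec (mx j : Int) (P q : List Int) :
    ∀ dN : Nat, ∀ h cnt s1 s2 : Int, ((q.length : Int) - h).toNat = dN →
      pvBInv mx P q h cnt s1 s2 j →
      pvBInv mx P q (pvB_pop mx j q h cnt s1 s2).1 (pvB_pop mx j q h cnt s1 s2).2.1
        (pvB_pop mx j q h cnt s1 s2).2.2.1 (pvB_pop mx j q h cnt s1 s2).2.2.2 j ∧
      (∀ p ∈ q.drop (pvB_pop mx j q h cnt s1 s2).1.toNat, (j - p) * (j - p) < mx) := by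
  intro dN
  induction dN with
  | zero =>
    intro h cnt s1 s2 h1 hinv
    obtain ⟨a1, a2, a3, a4, a5, a6, a7, a8⟩ := hinv
    rw [pvB_pop, dif_neg (fun hc => by omega)]
    refine ⟨⟨a1, a2, a3, a4, a5, a6, a7, a8⟩, ?_⟩
    have hnil : q.drop h.toNat = [] := List.drop_eq_nil_of_le (by omega)
    rw [hnil]
    intro p hp
    simp at hp
  | succ d ih =>
    intro h cnt s1 s2 h1 hinv
    obtain ⟨a1, a2, a3, a4, a5, a6, a7, a8⟩ := hinv
    by_cases hg : h < (q.length : Int) ∧ mx ≤ (j - pvGet q h) * (j - pvGet q h)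
    · rw [pvB_pop, dif_pos hg]
      have hhl : h.toNat < q.length := by omega
      have hgp : pvGet q h = q[h.toNat] := pvGet_eq_getElem a1 (by omega)
      have hdr : q.drop h.toNat = q[h.toNat] :: q.drop (h.toNat + 1) :=
        List.drop_eq_getElem_cons hhl
      have htn : (h + 1).toNat = h.toNat + 1 := by omega
      have hmem : q[h.toNat] ∈ q := List.getElem_mem hhl
      have hp0 := a4 _ hmem
      have hinv' : pvBInv mx P q (h + 1) (cnt - 1) (s1 - pvGet q h)
          (s2 - pvGet q h * pvGet q h) j := by
        refine ⟨by omega, by omega, a3, a4, ?_, ?_, ?_, ?_⟩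
        · rw [htn]; rw [hdr, List.length_cons] at a5; push_cast at a5 ⊢; omega
        · rw [htn]; rw [hdr, List.sum_cons] at a6; rw [hgp]; omega
        · rw [htn]; rw [hdr, List.map_cons, List.sum_cons] at a7; rw [hgp]; omega
        · intro j' hj'
          have := a8 j' hj'
          rw [hdr] at this
          simp only [List.map_cons, List.sum_cons] at this
          have hz : pvF mx (j' - q[h.toNat]) = 0 := by
            refine pvF_dead (p := q[h.toNat]) (j := j) hp0.2 hj' ?_
            rw [hgp] at hg
            exact hg.2
          rw [hz] at this
          rw [htn]
          omega
      exact ih (h + 1) _ _ _ (by omega) hinv'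
    · rw [pvB_pop, dif_neg hg]
      refine ⟨⟨a1, a2, a3, a4, a5, a6, a7, a8⟩, ?_⟩
      by_cases hhl : h < (q.length : Int)
      · have hhl' : h.toNat < q.length := by omega
        have hgp : pvGet q h = q[h.toNat] := pvGet_eq_getElem a1 (by omega)
        have hdr : q.drop h.toNat = q[h.toNat] :: q.drop (h.toNat + 1) :=
          List.drop_eq_getElem_cons hhl'
        have hhead : (j - q[h.toNat]) * (j - q[h.toNat]) < mx := by
          rcases not_and_or.mp hg with hc | hc
          · omega
          · rw [hgp] at hc; omega
        have hpw : (q.drop h.toNat).Pairwise (· ≤ ·) := a3.sublist (List.drop_sublist _ _)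
        rw [hdr] at hpw
        rw [hdr]
        intro p hp
        rcases List.mem_cons.mp hp with rfl | hp'
        · exact hhead
        · have hle : q[h.toNat] ≤ p := (List.pairwise_cons.mp hpw).1 p hp'
          have hpj : p ≤ j := (a4 p (List.mem_of_mem_drop (by rw [hdr]; exact List.mem_cons_of_mem _ hp'))).2
          have : (j - p) * (j - p) ≤ (j - q[h.toNat]) * (j - q[h.toNat]) :=
            mul_self_le_mul_self (by omega) (by omega)
          omega
      · have hnil : q.drop h.toNat = [] := List.drop_eq_nil_of_le (by omega)
        rw [hnil]
        intro p hp
        simp at hp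

-- adding an arrow at j (mx > 0) keeps the window invariant with P ++ [j], all-active
theorem pvBInv_arrow {mx : Int} {P q : List Int} {h cnt s1 s2 j : Int} (hmx : 0 < mx)
    (h0j : 0 ≤ j) (hinv : pvBInv mx P q h cnt s1 s2 j)
    (hact : ∀ p ∈ q.drop h.toNat, (j - p) * (j - p) < mx) :
    pvBInv mx (P ++ [j]) (q ++ [j]) h (cnt + 1) (s1 + j) (s2 + j * j) j ∧
    (∀ p ∈ (q ++ [j]).drop h.toNat, (j - p) * (j - p) < mx) := by
  obtain ⟨a1, a2, a3, a4, a5, a6, a7, a8⟩ := hinv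
  have hdr : (q ++ [j]).drop h.toNat = q.drop h.toNat ++ [j] :=
    List.drop_append_of_le_length (by omega)
  constructor
  · refine ⟨a1, by simp; omega, ?_, ?_, ?_, ?_, ?_, ?_⟩
    · rw [List.pairwise_append]
      exact ⟨a3, List.pairwise_singleton _ _, fun p hp b hb => by
        simp at hb; subst hb; exact (a4 p hp).2⟩
    · intro p hp
      rcases List.mem_append.mp hp with hp' | hp'
      · exact a4 p hp'
      · simp at hp'; subst hp'; exact ⟨h0j, le_refl _⟩
    · rw [hdr, List.length_append, List.length_singleton]; push_cast; omega
    · rw [hdr, List.sum_append, List.sum_singleton]; omega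
    · rw [hdr, List.map_append, List.sum_append, List.map_singleton, List.sum_singleton]; omega
    · intro j' hj'
      rw [pvS_append, a8 j' hj', hdr, List.map_append, List.sum_append]
      simp
  · rw [hdr]
    intro p hp
    rcases List.mem_append.mp hp with hp' | hp'
    · exact hact p hp'
    · simp at hp'; subst hp'; simpa using hmx

-- a wasted arrow (mx ≤ 0) contributes nothing: P ++ [j] has the same total damage
theorem pvBInv_waste {mx : Int} {P q : List Int} {h cnt s1 s2 j : Int} (hmx : mx ≤ 0)
    (hinv : pvBInv mx P q h cnt s1 s2 j) : pvBInv mx (P ++ [j]) q h cnt s1 s2 j := by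
  obtain ⟨a1, a2, a3, a4, a5, a6, a7, a8⟩ := hinv
  refine ⟨a1, a2, a3, a4, a5, a6, a7, fun t ht => ?_⟩
  rw [pvS_append, pvF_nonpos hmx, a8 t ht]
  ring

-- the window aggregates compute exactly the full damage at j once every held arrow is active
theorem pvDmg (mx : Int) (P q : List Int) (h c s1 s2 j : Int)
    (hinv : pvBInv mx P q h c s1 s2 j)
    (hact : ∀ p ∈ q.drop h.toNat, (j - p) * (j - p) < mx) :
    c * (mx - j * j) + 2 * j * s1 - s2 = pvS mx P j := by
  obtain ⟨_, _, _, _, a5, a6, a7, a8⟩ := hinv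
  rw [a8 j (le_refl j), pvActiveSum mx j _ hact, pvQuadSum, a5, a6, a7]

theorem pvB_shoot_done (mx k j : Int) (fuel : Nat) (used : Int) (q : List Int)
    (cnt s1 s2 need : Int) (hf : 0 < fuel) (hn : need ≤ 0) :
    pvB_shoot mx k j fuel used q cnt s1 s2 need = some (used, q, cnt, s1, s2) := by
  cases fuel with
  | zero => omega
  | succ f => simp [pvB_shoot]; omega

theorem pvB_main_stop (mx k n : Int) (a : List Int) (j used : Int) (q : List Int)
    (h cnt s1 s2 : Int) (hj : n ≤ j) : pvB_main mx k n a j used q h cnt s1 s2 = true := by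
  rw [pvB_main]; simp; omega

-- B marches silently across a stretch of already-destroyed targets
theorem pvMarch (mx k n : Int) (a P : List Int) (i2 : Int) (hfin : i2 ≤ n) :
    ∀ dN : Nat, ∀ (j0 used : Int) (q : List Int) (h c s1 s2 : Int),
      (i2 - j0).toNat = dN → j0 ≤ i2 → 0 ≤ j0 →
      pvBInv mx P q h c s1 s2 j0 →
      (∀ t : Int, j0 ≤ t → t < i2 → pvGet a t - pvS mx P t ≤ 0) →
      ∃ h' c' s1' s2', pvBInv mx P q h' c' s1' s2' i2 ∧
        pvB_main mx k n a j0 used q h c s1 s2 = pvB_main mx k n a i2 used q h' c' s1' s2' := by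
  intro dN
  induction dN with
  | zero =>
    intro j0 used q h c s1 s2 h1 h2 h3 hinv hdead
    have : j0 = i2 := by omega
    subst this
    exact ⟨h, c, s1, s2, hinv, rfl⟩
  | succ d ih =>
    intro j0 used q h c s1 s2 h1 h2 h3 hinv hdead
    have hj0 : j0 < i2 := by omega
    rw [pvB_main, dif_pos (by omega)]
    obtain ⟨hinv', hact⟩ := pvB_pop_spec mx j0 P q ((q.length : Int) - h).toNat h c s1 s2 rfl hinv
    rcases hpp : pvB_pop mx j0 q h c s1 s2 with ⟨h', c', s1', s2'⟩
    rw [hpp] at hinv' hact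
    have hneed : c' * (mx - j0 * j0) + 2 * j0 * s1' - s2' = pvS mx P j0 := pvDmg _ _ _ _ _ _ _ _ hinv' hact
    dsimp only
    rw [hneed]
    rw [pvB_shoot_done mx k j0 (k.toNat + (pvGet a j0).toNat + 2) used q c' s1' s2'
      (pvGet a j0 - pvS mx P j0) (by omega) (hdead j0 (le_refl _) hj0)]
    obtain ⟨h'', c'', s1'', s2'', hinv2, heq⟩ := ih (j0 + 1) used q h' c' s1' s2' (by omega)
      (by omega) (by omega) (pvBInv_step hinv' (by omega)) (fun t ht1 ht2 => hdead t (by omega) ht2)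
    exact ⟨h'', c'', s1'', s2'', hinv2, heq⟩

-- ===== the simulation: A's outer loop against B's scan =====

theorem pvSIM (n m k : Int) (a : List Int) (x : Int)
    (hlen : n ≤ (a.length : Int)) (hx : 1 ≤ x)
    (hpre : 0 ≤ k ∨ 1 ≤ m ∨ ∀ v ∈ a.take n.toNat, v ≤ 0) :
    ∀ fuelA : Nat, ∀ (i used : Int) (hp P q : List Int) (h cnt s1 s2 : Int) (fs : Nat),
      0 ≤ i → i < n → 0 ≤ used → (0 ≤ k → used ≤ k) →
      pvAInv (m * x) n a hp P i →
      hp.length = a.length →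
      pvBInv (m * x) P q h cnt s1 s2 i →
      (∀ p ∈ q.drop h.toNat, (i - p) * (i - p) < m * x) →
      pvMu n (m * x) k i used hp ≤ fuelA →
      (if 1 ≤ m * x then (pvGet a i - pvS (m * x) P i).toNat else (k - used).toNat) < fs →
      pvA_loop n (m * x) k fuelA i used hp =
        (match pvB_shoot (m * x) k i fs used q cnt s1 s2 (pvGet a i - pvS (m * x) P i) with
         | none => false
         | some (u', q', c2, t1, t2) => pvB_main (m * x) k n a (i + 1) u' q' h c2 t1 t2) := by
  intro fuelA
  induction fuelA using Nat.strong_induction_on with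
  | _ fuelA IH =>
  intro i used hp P q h cnt s1 s2 fs h0i hin hu0 huk hA hlenhp hB hact hmu hfs
  obtain ⟨hAl, hAj⟩ := hA
  have hmu' : (n - i).toNat + (if 1 ≤ m * x then pvSuf n hp i else (k - used).toNat) ≤ fuelA := hmu
  obtain ⟨f', rfl⟩ : ∃ f', fuelA = f' + 1 := ⟨fuelA - 1, by omega⟩
  obtain ⟨fs', rfl⟩ : ∃ g, fs = g + 1 := ⟨fs - 1, by omega⟩
  -- entering position j0 of B's scan with f' fuel on A's side
  have enter : ∀ (j0 used' : Int) (hp' P' q' : List Int) (h2 c2 t1 t2 : Int),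
      0 ≤ j0 → j0 ≤ n → 0 ≤ used' → (0 ≤ k → used' ≤ k) →
      pvAInv (m * x) n a hp' P' j0 → hp'.length = a.length →
      pvBInv (m * x) P' q' h2 c2 t1 t2 j0 →
      pvMu n (m * x) k j0 used' hp' ≤ f' →
      pvA_loop n (m * x) k f' j0 used' hp' = pvB_main (m * x) k n a j0 used' q' h2 c2 t1 t2 := by
    intro j0 used' hp' P' q' h2 c2 t1 t2 b1 b2 b3 b4 bA bl bB bmu
    by_cases hj0n : j0 < n
    · rw [pvB_main, dif_pos hj0n]
      obtain ⟨binv, bact⟩ := pvB_pop_spec (m * x) j0 P' q' ((q'.length : Int) - h2).toNat h2 c2 t1 t2 rfl bB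
      rcases hpp : pvB_pop (m * x) j0 q' h2 c2 t1 t2 with ⟨h3, c3, u1, u2⟩
      rw [hpp] at binv bact
      dsimp only
      have hneed : c3 * (m * x - j0 * j0) + 2 * j0 * u1 - u2 = pvS (m * x) P' j0 :=
        pvDmg _ _ _ _ _ _ _ _ binv bact
      rw [hneed]
      have hSn := pvS_nonneg (m * x) P' j0
      exact IH f' (by omega) j0 used' hp' P' q' h3 c3 u1 u2
        (k.toNat + (pvGet a j0).toNat + 2) b1 hj0n b3 b4 ⟨bA.1, bA.2⟩ bl binv bact bmu
        (by split_ifs <;> omega)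
    · rw [pvB_main_stop _ _ _ _ _ _ _ _ _ _ _ (by omega),
        pvA_loop_stop _ _ _ _ _ _ _ (by omega)]
  have hS0 := pvS_nonneg (m * x) P i
  have hAi := hAj i le_rfl hin
  simp only [pvA_loop, if_pos hin]
  by_cases hal : 0 < pvGet hp i
  · have hneedpos : 0 < pvGet a i - pvS (m * x) P i := by have := hAi.1 hal; omega
    rw [if_pos hal]
    simp only [pvB_shoot]
    rw [if_pos hneedpos]
    by_cases hukk : used = k
    · rw [if_pos hukk, if_pos hukk]
    · rw [if_neg hukk, if_neg hukk]
      set hp2 := pvA_damage (m * x) n i i hp with hhp2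
      have hA2 : pvAInv (m * x) n a hp2 (P ++ [i]) i :=
        pvAInv_shoot h0i hin hlen ⟨hAl, hAj⟩
      obtain ⟨dlen, dunch, dchar⟩ :=
        pvA_damage_spec (m * x) n i h0i (n - i).toNat i hp rfl le_rfl (by omega)
      have hdownall : ∀ t : Int, i ≤ t → t < n → pvGet hp2 t ≤ pvGet hp t := by
        intro t ht1 ht2
        have := dchar t ht1 ht2
        have hFt := pvF_nonneg (m * x) (t - i)
        rw [this]
        split_ifs <;> omega
      have hp2i : pvGet hp2 i = pvGet hp i - pvF (m * x) 0 := by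
        have := dchar i le_rfl hin
        rw [if_pos hal, sub_self] at this
        exact this
      by_cases hmx : 0 < m * x
      · have hF0 : pvF (m * x) 0 = m * x := by simp [pvF]; omega
        rw [if_pos hmx]
        obtain ⟨hBarr, hactarr⟩ := pvBInv_arrow hmx h0i hB hact
        have hneed2 : pvGet a i - pvS (m * x) P i - m * x
            = pvGet a i - pvS (m * x) (P ++ [i]) i := by
          rw [pvS_append, sub_self, hF0]
          ring
        have hfspos : 1 ≤ fs' := by
          rw [if_pos (by omega : (1:Int) ≤ m * x)] at hfs
          omega
        by_cases hai2 : 0 < pvGet hp2 i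
        · rw [pvA_advance_alive hai2, hneed2]
          have hsufle : pvSuf n hp2 i + 1 ≤ pvSuf n hp i := by
            rw [pvSuf_cons hp2 hin, pvSuf_cons hp hin]
            have htail := pvSuf_le_pointwise n hp2 hp (n - (i + 1)).toNat (i + 1) rfl
              (by omega) (fun t ht1 ht2 => hdownall t (by omega) ht2)
            omega
          refine IH f' (by omega) i (used + 1) hp2 (P ++ [i]) (q ++ [i]) h (cnt + 1)
            (s1 + i) (s2 + i * i) fs' h0i hin (by omega) (fun hk => by omega) hA2
            (by rw [dlen, hAl]) hBarr hactarr ?_ ?_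
          · unfold pvMu
            rw [if_pos (by omega : (1:Int) ≤ m * x)]
            rw [if_pos (by omega : (1:Int) ≤ m * x)] at hmu'
            omega
          · rw [if_pos (by omega : (1:Int) ≤ m * x)]
            rw [if_pos (by omega : (1:Int) ≤ m * x)] at hfs
            have : pvGet a i - pvS (m * x) (P ++ [i]) i
                = pvGet a i - pvS (m * x) P i - m * x := hneed2.symm
            omega
        · rw [hneed2]
          have hneed2' : pvGet a i - pvS (m * x) (P ++ [i]) i ≤ 0 :=
            (hA2.2 i le_rfl hin).2 (by omega)
          rw [pvB_shoot_done (m * x) k i fs' (used + 1) (q ++ [i]) (cnt + 1) (s1 + i)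
            (s2 + i * i) _ (by omega) hneed2']
          dsimp only
          obtain ⟨adv1, adv2, adv3, adv4⟩ := pvA_advance_spec n hp2 (n - i).toNat i rfl
          have hadvn : pvA_advance n hp2 i ≤ n := by
            have : max i n = n := max_eq_right (by omega)
            omega
          have hadv1 : i + 1 ≤ pvA_advance n hp2 i := by
            rcases eq_or_lt_of_le adv1 with heq | hlt
            · exfalso
              have := adv4 (by omega)
              rw [← heq] at this
              omega
            · omega
          have hdeadrange : ∀ t : Int, i + 1 ≤ t → t < pvA_advance n hp2 i →
              pvGet a t - pvS (m * x) (P ++ [i]) t ≤ 0 := fun t ht1 ht2 =>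
            (hA2.2 t (by omega) (by omega)).2 (adv3 t (by omega) ht2)
          obtain ⟨h4, c4, v1, v2, hBf, heqB⟩ := pvMarch (m * x) k n a (P ++ [i])
            (pvA_advance n hp2 i) hadvn (pvA_advance n hp2 i - (i + 1)).toNat (i + 1)
            (used + 1) (q ++ [i]) h (cnt + 1) (s1 + i) (s2 + i * i) rfl (by omega)
            (by omega) (pvBInv_step hBarr (by omega)) hdeadrange
          rw [heqB]
          refine enter (pvA_advance n hp2 i) (used + 1) hp2 (P ++ [i]) (q ++ [i]) h4 c4 v1 v2
            (by omega) hadvn (by omega) (fun hk => by omega)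
            (pvAInv_mono hA2 adv1) (by rw [dlen, hAl]) hBf ?_
          unfold pvMu
          rw [if_pos (by omega : (1:Int) ≤ m * x)]
          rw [if_pos (by omega : (1:Int) ≤ m * x)] at hmu'
          have hs1 : pvSuf n hp2 (pvA_advance n hp2 i) ≤ pvSuf n hp2 i :=
            pvSuf_mono_idx n hp2 (pvA_advance n hp2 i - i).toNat i _ rfl adv1
          have hs2 : pvSuf n hp2 i ≤ pvSuf n hp i :=
            pvSuf_le_pointwise n hp2 hp (n - i).toNat i rfl (by omega) hdownall
          omega
      · -- wasted arrow: m*x ≤ 0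
        have hk0 : 0 ≤ k := by
          rcases hpre with hk | hm1 | hdead
          · exact hk
          · exfalso
            have h1 : (1:Int) * 1 ≤ m * x := mul_le_mul hm1 hx (by norm_num) (by omega)
            omega
          · exfalso
            have hil : i.toNat < a.length := by omega
            have hgi : pvGet a i = a[i.toNat] := pvGet_eq_getElem h0i (by omega)
            have hmem : a[i.toNat] ∈ a.take n.toNat := by
              have hit : i.toNat < (a.take n.toNat).length := by simp; omega
              have := List.getElem_take (xs := a) (i := i.toNat) (h := hit)
              rw [← this]
              exact List.getElem_mem hit
            have := hdead _ hmem
            omega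
        rw [if_neg hmx]
        have hF0 : pvF (m * x) 0 = 0 := pvF_nonpos (by omega) 0
        have hBw : pvBInv (m * x) (P ++ [i]) q h cnt s1 s2 i := pvBInv_waste (by omega) hB
        have hneedeq : pvGet a i - pvS (m * x) P i = pvGet a i - pvS (m * x) (P ++ [i]) i := by
          rw [pvS_append, sub_self, hF0]
          ring
        have hadv : pvA_advance n hp2 i = i := pvA_advance_alive (by rw [hp2i, hF0]; omega)
        rw [hadv, hneedeq]
        refine IH f' (by omega) i (used + 1) hp2 (P ++ [i]) q h cnt s1 s2 fs' h0i hin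
          (by omega) (fun _ => by omega) hA2 (by rw [dlen, hAl]) hBw hact ?_ ?_
        · unfold pvMu
          rw [if_neg (by omega : ¬ (1:Int) ≤ m * x)]
          rw [if_neg (by omega : ¬ (1:Int) ≤ m * x)] at hmu'
          omega
        · rw [if_neg (by omega : ¬ (1:Int) ≤ m * x)]
          rw [if_neg (by omega : ¬ (1:Int) ≤ m * x)] at hfs
          omega
  · rw [if_neg hal]
    have hneednp : pvGet a i - pvS (m * x) P i ≤ 0 := hAi.2 (by omega)
    rw [pvB_shoot_done (m * x) k i (fs' + 1) used q cnt s1 s2 _ (by omega) hneednp]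
    dsimp only
    obtain ⟨adv1, adv2, adv3, adv4⟩ := pvA_advance_spec n hp (n - i).toNat i rfl
    have hadvn : pvA_advance n hp i ≤ n := by
      have : max i n = n := max_eq_right (by omega)
      omega
    have hadv1 : i + 1 ≤ pvA_advance n hp i := by
      rcases eq_or_lt_of_le adv1 with heq | hlt
      · exfalso
        have := adv4 (by omega)
        rw [← heq] at this
        omega
      · omega
    have hdeadrange : ∀ t : Int, i + 1 ≤ t → t < pvA_advance n hp i →
        pvGet a t - pvS (m * x) P t ≤ 0 := fun t ht1 ht2 =>
      (hAj t (by omega) (by omega)).2 (adv3 t (by omega) ht2)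
    obtain ⟨h4, c4, v1, v2, hBf, heqB⟩ := pvMarch (m * x) k n a P (pvA_advance n hp i)
      hadvn (pvA_advance n hp i - (i + 1)).toNat (i + 1) used q h cnt s1 s2 rfl (by omega)
      (by omega) (pvBInv_step hB (by omega)) hdeadrange
    rw [heqB]
    refine enter (pvA_advance n hp i) used hp P q h4 c4 v1 v2 (by omega) hadvn hu0 huk
      (pvAInv_mono ⟨hAl, hAj⟩ adv1) hlenhp hBf ?_
    unfold pvMu
    have hs1 : pvSuf n hp (pvA_advance n hp i) ≤ pvSuf n hp i :=
      pvSuf_mono_idx n hp (pvA_advance n hp i - i).toNat i _ rfl adv1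
    split_ifs at hmu' ⊢ <;> omega


-- hooking the two checks together
theorem pvCanEq (n m k : Int) (a : List Int) (x : Int)
    (hlen : n ≤ (a.length : Int)) (hx : 1 ≤ x)
    (hpre : 0 ≤ k ∨ 1 ≤ m ∨ ∀ v ∈ a.take n.toNat, v ≤ 0) :
    can_destroy_all_targets n m k a x = pvB_can n m k a x := by
  unfold can_destroy_all_targets pvB_can
  by_cases hn : 0 < n
  · rw [pvB_main, dif_pos hn]
    have hpp : pvB_pop (m * x) 0 [] 0 0 0 0 = (0, 0, 0, 0) := by
      rw [pvB_pop, dif_neg (fun hc => by exact absurd hc.1 (by norm_num))]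
    rw [hpp]
    dsimp only
    have hne : pvGet a 0 - (0 * (m * x - 0 * 0) + 2 * 0 * 0 - 0)
        = pvGet a 0 - pvS (m * x) [] 0 := by simp [pvS]
    rw [hne]
    have hs := pvSuf_le_total n a (n - 0).toNat 0 rfl le_rfl hlen
    refine pvSIM n m k a x hlen hx hpre (pvA_fuel n k a) 0 0 a [] [] 0 0 0 0
      (k.toNat + (pvGet a 0).toNat + 2) le_rfl hn le_rfl (fun hk => hk) ?_ rfl ?_ ?_ ?_ ?_
    · refine ⟨rfl, fun j hj1 hj2 => ?_⟩
      simp [pvS]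
    · refine ⟨le_refl 0, by simp, List.Pairwise.nil, by simp, by simp, by simp, by simp,
        fun j' _ => by simp [pvS]⟩
    · intro p hp; simp at hp
    · unfold pvMu pvA_fuel
      split_ifs <;> omega
    · simp only [pvS, List.map_nil, List.sum_nil]
      split_ifs <;> omega
  · rw [pvA_loop_stop n (m * x) k _ 0 0 a (by omega), pvB_main_stop (m * x) k n a 0 0 [] 0 0 0 0 (by omega)]

-- the two (identical) binary searches agree once the checks do
theorem pvSearchEq (n m k : Int) (a : List Int)
    (hcan : ∀ x : Int, 1 ≤ x → can_destroy_all_targets n m k a x = pvB_can n m k a x) :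
    ∀ dN : Nat, ∀ low high final : Int, (high - low + 1).toNat = dN → 1 ≤ low →
      pvA_search n m k a low high final = pvB_search n m k a low high final := by
  intro dN
  induction dN using Nat.strong_induction_on with
  | _ dN ih =>
    intro low high final h1 h2
    by_cases hle : low ≤ high
    · have hb := PySem.Int.floordiv_two_mid_bounds hle
      rw [pvA_search, pvB_search, dif_pos hle, dif_pos hle]
      have hm : PySem.Int.floordiv (high + low) 2 = PySem.Int.floordiv (low + high) 2 := by
        rw [Int.add_comm]
      rw [hm, hcan _ (by omega)]
      by_cases hc : pvB_can n m k a (PySem.Int.floordiv (low + high) 2) = true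
      · rw [if_pos hc, if_pos hc]
        exact ih _ (by omega) low _ _ rfl h2
      · rw [if_neg hc, if_neg hc]
        exact ih _ (by omega) _ high final rfl (by omega)
    · rw [pvA_search, pvB_search, dif_neg hle, dif_neg hle]

-- ===== VERDICT (by name: the statement is the Claim_ definition above) =====
theorem find_minimum_x_spec : Claim_equal_find_minimum_x := by
  intro n m k a _hdom hpre
  unfold Spec_find_minimum_x find_minimum_x find_minimum_x_alt
  obtain ⟨hlen, hdisj⟩ := hpre
  exact pvSearchEq n m k a (fun x hx => pvCanEq n m k a x hlen hx hdisj)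
    (pvBig - 1 + 1).toNat 1 pvBig pvBig (by norm_num [pvBig]) le_rfl
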